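-- pv_equiv track=rewrite | github.com/cmmmalik/mse | parser/Parse.py | list_dict
-- ===== SOURCE A (Python) =====
-- from collections import OrderedDict
--
-- def list_dict(input=list):
--
--     """Combines the elements of given input (list) containing dictionaries that spans over two/or more elements
--     input: list"""
--
--     outdict = OrderedDict()
--     for c,line in enumerate(input):
--
--         line = line.split(":", maxsplit=1)
--         key = line[0].strip()
--         value = line[-1].strip()
--
--         if value.startswith("{"):
--             for secondline in input[c+1::]:
--                 secondline = secondline.strip()
--                 value = value.strip() + secondline.strip()
--                 if secondline.endswith("}"):
--                     break
--             outdict[key] = value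
--
--         elif value.endswith("}") or value.endswith(","):
--             continue
--         else:
--             outdict[key] = value
--     return outdict
-- ===== SOURCE B (Python) =====
-- def list_dict(input=list):
--     """Same result as A, but in three linear passes: parse every line once,
--     then one backward pass keeps the stripped continuation lines (up to the
--     next line ending in '}') as a segment list and records the joined value
--     for every brace-opened position, then one forward pass fills the dict.
--     No forward rescan of the remaining lines is ever performed."""
--     n = len(input)
--     stripped = [l.strip() for l in input]
--     parsed = []
--     for line in input:
--         parts = line.split(':', 1)
--         parsed.append((parts[0].strip(), parts[-1].strip()))
--     res = [None] * n
--     segs = []  # stripped lines after position i, reversed, up to the next closer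
--     for i in range(n - 1, -1, -1):
--         value = parsed[i][1]
--         if value.startswith('{'):
--             res[i] = value + ''.join(reversed(segs))
--         s = stripped[i]
--         if s.endswith('}'):
--             segs = [s]
--         else:
--             segs.append(s)
--     out = {}
--     for (key, value), r in zip(parsed, res):
--         if value.startswith('{'):
--             out[key] = r
--         elif value.endswith('}') or value.endswith(','):
--             continue
--         else:
--             out[key] = value
--     return out
-- ===== Notes on version B (the rewrite author's own statement) =====
-- stated objective: alternative
-- what changed: Replaces A's per-'{'-key forward rescan with three linear passes: parse each line once, a backward pass that maintains the continuation lines up to the next closing-brace line as a segment list and records the joined value for each brace-opened position, and a forward pass that fills the dict from the precomputed values.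
import Mathlib
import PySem

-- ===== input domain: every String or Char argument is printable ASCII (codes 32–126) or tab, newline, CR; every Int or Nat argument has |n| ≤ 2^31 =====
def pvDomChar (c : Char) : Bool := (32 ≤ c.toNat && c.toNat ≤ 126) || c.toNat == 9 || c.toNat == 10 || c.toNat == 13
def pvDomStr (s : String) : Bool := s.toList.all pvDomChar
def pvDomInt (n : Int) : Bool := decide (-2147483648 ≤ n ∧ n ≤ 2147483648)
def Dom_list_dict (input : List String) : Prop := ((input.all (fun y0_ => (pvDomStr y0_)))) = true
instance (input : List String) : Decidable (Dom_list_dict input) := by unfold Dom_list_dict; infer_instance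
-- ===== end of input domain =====

-- B replaces A's per-'{'-key forward rescan by three linear passes: parse each
-- line once, a backward pass keeping the continuation lines up to the next
-- closing-brace line as a segment list (recording the joined value for each
-- brace-opened position), and a forward pass filling the dict (objective: alternative).

-- ===== PORT A =====
-- A's inner 'for secondline in input[c+1::]' loop with its break
def aInner : String → List String → String
  | value, [] => value
  | value, l :: ls =>
    let secondline := PySem.Str.strip l
    let value' := PySem.Str.strip value ++ PySem.Str.strip secondline
    if PySem.Str.endswith secondline "}" then value' else aInner value' ls

-- A's loop body for one (c, line)
def aStep (input : List String) (outdict : PySem.Dict String String)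
    (ce : Int × String) : PySem.Dict String String :=
  let parts := (PySem.Str.splitMax? ce.2 ":" 1).getD []
  let key := PySem.Str.strip ((PySem.List.pyGet? parts 0).getD "")
  let value := PySem.Str.strip ((PySem.List.pyGet? parts (-1)).getD "")
  if PySem.Str.startswith value "{" then
    outdict.insert key (aInner value (PySem.List.slice input (some (ce.1 + 1)) none))
  else if PySem.Str.endswith value "}" || PySem.Str.endswith value "," then outdict
  else outdict.insert key value

def list_dict (input : List String) : List (String × String) :=
  ((PySem.List.enumerate input).foldl (aStep input) PySem.Dict.empty).items

-- ===== PORT B =====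
-- Source B's first pass: parse one line into (key, value)
def bParse (line : String) : String × String :=
  let parts := (PySem.Str.splitMax? line ":" 1).getD []
  (PySem.Str.strip ((PySem.List.pyGet? parts 0).getD ""),
   PySem.Str.strip ((PySem.List.pyGet? parts (-1)).getD ""))

-- Source B's backward pass over (stripped, parsed) pairs: returns (segs, res) --
-- the reversed segment list of continuation lines and the per-position result
def bBack : List (String × (String × String)) → List String × List (Option String)
  | [] => ([], [])
  | (s, kv) :: rest =>
    let prev := bBack rest
    let r := if PySem.Str.startswith kv.2 "{"
             then some (kv.2 ++ PySem.Str.join "" prev.1.reverse) else none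
    (if PySem.Str.endswith s "}" then [s] else prev.1 ++ [s], r :: prev.2)

-- Source B's forward pass filling the dict from parsed pairs and precomputed results
def bForward : List ((String × String) × Option String) → PySem.Dict String String → PySem.Dict String String
  | [], out => out
  | (kv, r) :: rest, out =>
    bForward rest
      (if PySem.Str.startswith kv.2 "{" then out.insert kv.1 (r.getD "")
       else if PySem.Str.endswith kv.2 "}" || PySem.Str.endswith kv.2 "," then out
       else out.insert kv.1 kv.2)

def list_dict_alt (input : List String) : List (String × String) :=
  let stripped := input.map PySem.Str.strip
  let parsed := input.map bParse
  let res := (bBack (stripped.zip parsed)).2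
  (bForward (parsed.zip res) PySem.Dict.empty).items

-- ===== PRECONDITION & SPEC =====
def Spec_list_dict (input : List String) (out : List (String × String)) : Prop := out = list_dict_alt input
instance (input : List String) (out : List (String × String)) : Decidable (Spec_list_dict input out) := by unfold Spec_list_dict; infer_instance

-- ===== CLAIM (what is proved, stated in full; the proofs are below) =====
def Claim_equal_list_dict : Prop := ∀ (input : List String), Dom_list_dict input → Spec_list_dict input (list_dict input)

-- ===== LEMMAS AND PROOFS =====

-- dropWhile facts
theorem pv_dw_head_false {p : Char → Bool} :
    ∀ {a : List Char} {c : Char} {t : List Char},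
      List.dropWhile p a = c :: t → p c = false := by
  intro a
  induction a with
  | nil => intro c t h; simp at h
  | cons x xs ih =>
    intro c t h
    rw [List.dropWhile_cons] at h
    split at h
    · exact ih h
    · rename_i hx
      cases h
      simpa using hx

theorem pv_dw_cons_false {p : Char → Bool} {c : Char} {t : List Char}
    (h : List.dropWhile p (c :: t) = c :: t) : p c = false :=
  pv_dw_head_false h

theorem pv_dw_idem {p : Char → Bool} (l : List Char) :
    List.dropWhile p (List.dropWhile p l) = List.dropWhile p l := by
  cases h : List.dropWhile p l with
  | nil => rfl
  | cons c t =>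
    rw [List.dropWhile_cons, if_neg (by simp [pv_dw_head_false h])]

theorem pv_lstrip_append {a b : List Char}
    (ha : PySem.Chars.lstrip a = a) (hb : PySem.Chars.lstrip b = b) :
    PySem.Chars.lstrip (a ++ b) = a ++ b := by
  cases a with
  | nil => simpa using hb
  | cons c t =>
    have hc : PySem.Chars.isspace c = false := pv_dw_cons_false ha
    simp [PySem.Chars.lstrip, hc]

theorem pv_rstrip_eq_iff {a : List Char} :
    PySem.Chars.rstrip a = a ↔ PySem.Chars.lstrip a.reverse = a.reverse := by
  unfold PySem.Chars.rstrip PySem.Chars.lstrip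
  constructor
  · intro h; conv_rhs => rw [← h]; simp
  · intro h; rw [h]; simp

theorem pv_rstrip_append {a b : List Char}
    (ha : PySem.Chars.rstrip a = a) (hb : PySem.Chars.rstrip b = b) :
    PySem.Chars.rstrip (a ++ b) = a ++ b := by
  rw [pv_rstrip_eq_iff] at *
  rw [List.reverse_append]
  exact pv_lstrip_append hb ha

-- strip a = a splits into its two halves
theorem pv_strip_parts {a : List Char} (h : PySem.Chars.strip a = a) :
    PySem.Chars.lstrip a = a ∧ PySem.Chars.rstrip a = a := by
  have hsuf : PySem.Chars.lstrip a <:+ a := List.dropWhile_suffix _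
  have hstrip : PySem.Chars.rstrip (PySem.Chars.lstrip a) = a := h
  have hr_le : (PySem.Chars.rstrip (PySem.Chars.lstrip a)).length ≤ (PySem.Chars.lstrip a).length := by
    unfold PySem.Chars.rstrip
    have := List.IsSuffix.length_le
      (List.dropWhile_suffix (l := (PySem.Chars.lstrip a).reverse) PySem.Chars.isspace)
    simpa using this
  have hl : PySem.Chars.lstrip a = a := by
    apply List.IsSuffix.eq_of_length hsuf
    have h1 := List.IsSuffix.length_le hsuf
    rw [hstrip] at hr_le
    omega
  refine ⟨hl, ?_⟩
  rw [hl] at hstrip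
  exact hstrip

theorem pv_cstrip_append {a b : List Char}
    (ha : PySem.Chars.strip a = a) (hb : PySem.Chars.strip b = b) :
    PySem.Chars.strip (a ++ b) = a ++ b := by
  obtain ⟨hla, hra⟩ := pv_strip_parts ha
  obtain ⟨hlb, hrb⟩ := pv_strip_parts hb
  unfold PySem.Chars.strip
  rw [pv_lstrip_append hla hlb]
  exact pv_rstrip_append hra hrb

theorem pv_lstrip_idem (a : List Char) :
    PySem.Chars.lstrip (PySem.Chars.lstrip a) = PySem.Chars.lstrip a :=
  pv_dw_idem a

theorem pv_rstrip_idem (a : List Char) :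
    PySem.Chars.rstrip (PySem.Chars.rstrip a) = PySem.Chars.rstrip a := by
  rw [pv_rstrip_eq_iff]
  unfold PySem.Chars.rstrip PySem.Chars.lstrip
  rw [List.reverse_reverse]
  exact pv_dw_idem a.reverse

-- rstrip of a left-stripped list is still left-stripped
theorem pv_lstrip_rstrip {a : List Char} (h : PySem.Chars.lstrip a = a) :
    PySem.Chars.lstrip (PySem.Chars.rstrip a) = PySem.Chars.rstrip a := by
  have hpre : PySem.Chars.rstrip a <+: a := by
    unfold PySem.Chars.rstrip
    have h2 := (List.dropWhile_suffix (l := a.reverse) PySem.Chars.isspace).reverse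
    simpa using h2
  cases hr : PySem.Chars.rstrip a with
  | nil => rfl
  | cons c t =>
    rw [hr] at hpre
    obtain ⟨s, hs⟩ := hpre
    have hc : PySem.Chars.isspace c = false := by
      apply pv_dw_cons_false (t := t ++ s)
      have hsa : c :: (t ++ s) = a := by simpa using hs
      rw [hsa]
      exact h
    simp [PySem.Chars.lstrip, hc]

theorem pv_cstrip_idem (a : List Char) :
    PySem.Chars.strip (PySem.Chars.strip a) = PySem.Chars.strip a := by
  unfold PySem.Chars.strip
  rw [pv_lstrip_rstrip (pv_lstrip_idem a), pv_rstrip_idem]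

-- the two facts lifted to String
theorem pv_strip_idem (s : String) :
    PySem.Str.strip (PySem.Str.strip s) = PySem.Str.strip s := by
  apply String.toList_inj.mp
  simp [PySem.Str.toList_strip, pv_cstrip_idem]

theorem pv_strip_append {a b : String}
    (ha : PySem.Str.strip a = a) (hb : PySem.Str.strip b = b) :
    PySem.Str.strip (a ++ b) = a ++ b := by
  apply String.toList_inj.mp
  have ha' : PySem.Chars.strip a.toList = a.toList := by
    rw [← PySem.Str.toList_strip, ha]
  have hb' : PySem.Chars.strip b.toList = b.toList := by
    rw [← PySem.Str.toList_strip, hb]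
  simp only [PySem.Str.toList_strip, String.toList_append]
  exact pv_cstrip_append ha' hb'

-- proof-side: the value A's inner scan appends (join up to the first close line)
def sufJoin : List String → String
  | [] => ""
  | s :: ls => if PySem.Str.endswith s "}" then s else s ++ sufJoin ls

-- A's inner scan computes exactly 'v ++ sufJoin of the stripped rest'
theorem pv_aInner_eq (rest : List String) :
    ∀ v : String, PySem.Str.strip v = v →
      aInner v rest = v ++ sufJoin (rest.map PySem.Str.strip) := by
  induction rest with
  | nil =>
    intro v _
    simp [aInner, sufJoin]
  | cons l ls ih =>
    intro v hv
    have hidem := pv_strip_idem l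
    show (if PySem.Str.endswith (PySem.Str.strip l) "}" then
            PySem.Str.strip v ++ PySem.Str.strip (PySem.Str.strip l)
          else aInner (PySem.Str.strip v ++ PySem.Str.strip (PySem.Str.strip l)) ls) = _
    rw [hv, hidem]
    have hsuf : sufJoin ((l :: ls).map PySem.Str.strip)
        = if PySem.Str.endswith (PySem.Str.strip l) "}" then PySem.Str.strip l
          else PySem.Str.strip l ++ sufJoin (ls.map PySem.Str.strip) := by
      simp only [List.map_cons, sufJoin]
    by_cases hbr : PySem.Str.endswith (PySem.Str.strip l) "}" = true
    · rw [if_pos hbr, hsuf, if_pos hbr]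
    · rw [if_neg hbr, ih _ (pv_strip_append hv hidem), hsuf, if_neg hbr, String.append_assoc]

-- join over "" distributes over cons
theorem pv_join_empty_cons (x : String) (L : List String) :
    PySem.Str.join "" (x :: L) = x ++ PySem.Str.join "" L := by
  cases L with
  | nil =>
    apply String.toList_inj.mp
    simp [PySem.Str.toList_join, PySem.Chars.join_singleton, PySem.Chars.join_nil]
  | cons y M =>
    apply String.toList_inj.mp
    simp [PySem.Str.toList_join, PySem.Chars.join_cons_cons]

-- B's segment list, reversed and joined, is sufJoin of the stripped lines
theorem pv_bBack_segs (xs : List (String × (String × String))) :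
    PySem.Str.join "" (bBack xs).1.reverse = sufJoin (xs.map (·.1)) := by
  induction xs with
  | nil => simp [bBack, sufJoin, PySem.Str.join]
  | cons p rest ih =>
    obtain ⟨s, kv⟩ := p
    simp only [bBack, List.map_cons, sufJoin]
    by_cases hbr : PySem.Str.endswith s "}" = true
    · rw [if_pos hbr, if_pos hbr]
      apply String.toList_inj.mp
      simp [PySem.Str.toList_join, PySem.Chars.join_singleton]
    · rw [if_neg hbr, if_neg hbr, List.reverse_append]
      simpa [pv_join_empty_cons] using congrArg (fun t => s ++ t) ih

-- B's loop body applied to the matching pair equals A's loop body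
theorem pv_step_eq (input : List String) (k : Nat) (x : String) (rest' : List String)
    (hdrop : input.drop k = x :: rest') (d : PySem.Dict String String)
    (r : Option String)
    (hr : r = (if PySem.Str.startswith (bParse x).2 "{"
               then some ((bParse x).2 ++ sufJoin (rest'.map PySem.Str.strip)) else none)) :
    aStep input d ((k : Int), x)
      = (if PySem.Str.startswith (bParse x).2 "{" then d.insert (bParse x).1 (r.getD "")
         else if PySem.Str.endswith (bParse x).2 "}" || PySem.Str.endswith (bParse x).2 "," then d
         else d.insert (bParse x).1 (bParse x).2) := by
  have hk1 : input.drop (k + 1) = rest' := by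
    rw [← List.tail_drop, hdrop]
    rfl
  have hcast : ((k : Int) + 1) = ((k + 1 : Nat) : Int) := by push_cast; ring
  have hsliceA : PySem.List.slice input (some ((k : Int) + 1)) none = rest' := by
    rw [hcast, PySem.List.slice_from input (Int.natCast_nonneg _)]
    simpa using hk1
  unfold aStep
  dsimp only
  rw [hsliceA, pv_aInner_eq rest' _ (pv_strip_idem _)]
  by_cases hbr : PySem.Str.startswith (bParse x).2 "{" = true
  · rw [if_pos (by simpa [bParse] using hbr), if_pos hbr, hr, if_pos hbr]
    simp [bParse]
  · rw [if_neg (by simpa [bParse] using hbr), if_neg hbr]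
    simp [bParse]

-- the fold of A over a suffix equals B's forward pass over the matching suffix
theorem pv_fold_eq (input : List String) :
    ∀ (rest : List String) (k : Nat) (d : PySem.Dict String String),
      input.drop k = rest →
      (PySem.List.enumerate rest (k : Int)).foldl (aStep input) d
        = bForward ((rest.map bParse).zip
            ((bBack ((rest.map PySem.Str.strip).zip (rest.map bParse))).2)) d := by
  intro rest
  induction rest with
  | nil => intro k d _; simp [PySem.List.enumerate, bForward]
  | cons x rest' ih =>
    intro k d hdrop
    have hk1 : input.drop (k + 1) = rest' := by
      rw [← List.tail_drop, hdrop]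
      rfl
    have hfst : ((rest'.map PySem.Str.strip).zip (rest'.map bParse)).map (·.1)
        = rest'.map PySem.Str.strip := by
      apply List.map_fst_zip
      simp
    simp only [PySem.List.enumerate, List.foldl_cons, List.map_cons, List.zip_cons_cons,
      bBack, bForward]
    rw [← pv_step_eq input k x rest' hdrop d _ (by rw [pv_bBack_segs, hfst])]
    have hcast : ((k : Int) + 1) = ((k + 1 : Nat) : Int) := by push_cast; ring
    rw [hcast]
    exact ih (k + 1) _ hk1

-- ===== VERDICT (by name: the statement is the Claim_ definition above) =====
theorem list_dict_spec : Claim_equal_list_dict := by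
  intro input _
  unfold Spec_list_dict list_dict list_dict_alt
  have h := pv_fold_eq input input 0 PySem.Dict.empty (by simp)
  simpa using congrArg PySem.Dict.items h
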